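-- pv_equiv track=rewrite | github.com/emalikides/mr_squiggle | find_strokes.py | dumb_filter
-- ===== SOURCE A (Python) =====
-- def dumb_filter(stroke_coords, comp_factor):
-- 	# filter large jumps.
-- 	new_stroke_coords = []
-- 	for stroke in stroke_coords:
-- 		if stroke:
-- 			p1 = stroke[0]
-- 			tstroke = [p1]
--
-- 			for p2 in stroke[1:]:
-- 				d = (p1[0]-p2[0])**2 + (p1[1]-p2[1])**2
-- 				if d > 2*(comp_factor-1)**2:
-- 					new_stroke_coords.append(tstroke)
-- 					tstroke=[]
-- 				tstroke.append(p2)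
-- 				p1 = p2
--
-- 			new_stroke_coords.append(tstroke)
--
-- 	return new_stroke_coords
-- ===== SOURCE B (Python) =====
-- def dumb_filter(stroke_coords, comp_factor):
--     thresh = 2 * (comp_factor - 1) ** 2
--     out = []
--     for stroke in stroke_coords:
--         if not stroke:
--             continue
--         breaks = [i for i in range(1, len(stroke))
--                   if (stroke[i-1][0] - stroke[i][0]) ** 2
--                      + (stroke[i-1][1] - stroke[i][1]) ** 2 > thresh]
--         start = 0
--         for b in breaks:
--             out.append(stroke[start:b])
--             start = b
--         out.append(stroke[start:])
--     return out
-- ===== Notes on version B (the rewrite author's own statement) =====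
-- stated objective: alternative
-- what changed: B replaces A's streaming accumulator (carrying the current partial segment and previous point through one pass) by a two-phase decomposition per stroke: first compute the list of break indices against the precomputed threshold, then cut the stroke into slices at those indices.
import Mathlib
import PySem

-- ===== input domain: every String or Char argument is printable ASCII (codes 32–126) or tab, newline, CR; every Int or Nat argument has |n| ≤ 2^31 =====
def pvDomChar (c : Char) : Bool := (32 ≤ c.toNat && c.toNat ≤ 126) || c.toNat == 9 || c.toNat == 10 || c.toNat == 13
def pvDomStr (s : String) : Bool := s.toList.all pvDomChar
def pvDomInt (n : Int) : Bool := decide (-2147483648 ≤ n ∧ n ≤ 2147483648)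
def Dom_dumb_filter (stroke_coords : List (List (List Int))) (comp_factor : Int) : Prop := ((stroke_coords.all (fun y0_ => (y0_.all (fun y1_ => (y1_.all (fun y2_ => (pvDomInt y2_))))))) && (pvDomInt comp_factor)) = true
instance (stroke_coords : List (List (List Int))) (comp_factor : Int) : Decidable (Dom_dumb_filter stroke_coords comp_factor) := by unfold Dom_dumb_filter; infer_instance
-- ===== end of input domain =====

-- B splits each stroke by precomputing break indices and slicing, instead of A's
-- streaming accumulator; same cost, different decomposition (objective: alternative).

-- point[i] : exact under Pre_ (every point compared has ≥ 2 coordinates); Python raises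
-- IndexError exactly where pyGet? is none, and Pre_ excludes those inputs.
def pvCoord (p : List Int) (i : Int) : Int := (PySem.List.pyGet? p i).getD 0
-- stroke[i] for i always in range inside the ports (1 ≤ i < len); getD [] never fires there.
def pvPt (s : List (List Int)) (i : Int) : List Int := (PySem.List.pyGet? s i).getD []

-- ===== PORT A =====
def dumb_filter (stroke_coords : List (List (List Int))) (comp_factor : Int) : List (List (List Int)) :=
  stroke_coords.foldl (fun new_stroke_coords stroke =>
    match stroke with
    | [] => new_stroke_coords
    | p1 :: rest =>
      let r := rest.foldl (fun st p2 =>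
        match st with
        | (p1, tstroke, acc) =>
          let d := (pvCoord p1 0 - pvCoord p2 0) ^ 2 + (pvCoord p1 1 - pvCoord p2 1) ^ 2
          if d > 2 * (comp_factor - 1) ^ 2 then (p2, [p2], acc ++ [tstroke])
          else (p2, tstroke ++ [p2], acc))
        (p1, [p1], new_stroke_coords)
      r.2.2 ++ [r.2.1]) []

-- ===== PORT B =====
def dumb_filter_alt (stroke_coords : List (List (List Int))) (comp_factor : Int) : List (List (List Int)) :=
  let thresh := 2 * (comp_factor - 1) ^ 2
  stroke_coords.foldl (fun out stroke =>
    if stroke.isEmpty then out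
    else
      let breaks := (PySem.List.pyRange 1 (stroke.length : Int) 1).filter (fun i =>
        decide ((pvCoord (pvPt stroke (i - 1)) 0 - pvCoord (pvPt stroke i) 0) ^ 2
          + (pvCoord (pvPt stroke (i - 1)) 1 - pvCoord (pvPt stroke i) 1) ^ 2 > thresh))
      let r := breaks.foldl (fun st b => (b, st.2 ++ [PySem.List.slice stroke (some st.1) (some b)]))
        ((0 : Int), out)
      r.2 ++ [PySem.List.slice stroke (some r.1) none]) []

-- ===== PRECONDITION & SPEC =====
-- Pre_ excludes inputs where Python A raises IndexError: a stroke with at least two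
-- points containing a point with fewer than two coordinates.
def Pre_dumb_filter (stroke_coords : List (List (List Int))) (comp_factor : Int) : Prop :=
  ∀ stroke ∈ stroke_coords, 2 ≤ stroke.length → ∀ p ∈ stroke, 2 ≤ p.length
instance (stroke_coords : List (List (List Int))) (comp_factor : Int) : Decidable (Pre_dumb_filter stroke_coords comp_factor) := by unfold Pre_dumb_filter; infer_instance

def pvWitness_dumb_filter : List (List (List Int)) × Int := ([[[0, 0], [3, 3]], []], 1)

def Spec_dumb_filter (stroke_coords : List (List (List Int))) (comp_factor : Int) (out : List (List (List Int))) : Prop := out = dumb_filter_alt stroke_coords comp_factor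
instance (stroke_coords : List (List (List Int))) (comp_factor : Int) (out : List (List (List Int))) : Decidable (Spec_dumb_filter stroke_coords comp_factor out) := by unfold Spec_dumb_filter; infer_instance

-- ===== CLAIM (what is proved, stated in full; the proofs are below) =====
def Claim_equal_dumb_filter : Prop := ∀ (stroke_coords : List (List (List Int))) (comp_factor : Int), Dom_dumb_filter stroke_coords comp_factor → Pre_dumb_filter stroke_coords comp_factor → Spec_dumb_filter stroke_coords comp_factor (dumb_filter stroke_coords comp_factor)

-- ===== LEMMAS AND PROOFS =====

def pvTh (cf : Int) : Int := 2 * (cf - 1) ^ 2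
def pvDist (a b : List Int) : Int :=
  (pvCoord a 0 - pvCoord b 0) ^ 2 + (pvCoord a 1 - pvCoord b 1) ^ 2

-- the common segmentation both programs compute, as a structural recursion
def pvSeg (cf : Int) : List (List Int) → List Int → List (List Int) → List (List (List Int))
  | ts, _, [] => [ts]
  | ts, p1, p2 :: rs =>
    if pvDist p1 p2 > pvTh cf then ts :: pvSeg cf [p2] p2 rs else pvSeg cf (ts ++ [p2]) p2 rs

def pvWalk (s : List (List Int)) : Int → List Int → List (List (List Int))
  | k, [] => [PySem.List.slice s (some k) none]
  | k, b :: bs => PySem.List.slice s (some k) (some b) :: pvWalk s b bs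

def pvCond (cf : Int) (s : List (List Int)) (i : Int) : Bool :=
  decide (pvDist (pvPt s (i - 1)) (pvPt s i) > pvTh cf)

def pvF (cf : Int) : List (List Int) → List (List (List Int))
  | [] => []
  | p :: rs => pvSeg cf [p] p rs

lemma pvA_inner (cf : Int) : ∀ (rest : List (List Int)) (p1 : List Int) (ts : List (List Int)) (acc : List (List (List Int))),
    ((rest.foldl (fun st p2 =>
        match st with
        | (p1, tstroke, acc) =>
          let d := (pvCoord p1 0 - pvCoord p2 0) ^ 2 + (pvCoord p1 1 - pvCoord p2 1) ^ 2
          if d > 2 * (cf - 1) ^ 2 then (p2, [p2], acc ++ [tstroke])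
          else (p2, tstroke ++ [p2], acc)) (p1, ts, acc)).2.2 ++
      [(rest.foldl (fun st p2 =>
        match st with
        | (p1, tstroke, acc) =>
          let d := (pvCoord p1 0 - pvCoord p2 0) ^ 2 + (pvCoord p1 1 - pvCoord p2 1) ^ 2
          if d > 2 * (cf - 1) ^ 2 then (p2, [p2], acc ++ [tstroke])
          else (p2, tstroke ++ [p2], acc)) (p1, ts, acc)).2.1]) = acc ++ pvSeg cf ts p1 rest := by
  intro rest
  induction rest with
  | nil => intro p1 ts acc; simp [pvSeg]
  | cons p2 rs ih =>
    intro p1 ts acc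
    simp only [List.foldl_cons]
    by_cases h : (pvCoord p1 0 - pvCoord p2 0) ^ 2 + (pvCoord p1 1 - pvCoord p2 1) ^ 2 > 2 * (cf - 1) ^ 2
    · simp only [h, if_pos, ih]
      simp [pvSeg, pvDist, pvTh, h]
    · simp only [h, ih]
      simp [pvSeg, pvDist, pvTh, h]

lemma pvB_fold (s : List (List Int)) : ∀ (bs : List Int) (k : Int) (out : List (List (List Int))),
    ((bs.foldl (fun st b => (b, st.2 ++ [PySem.List.slice s (some st.1) (some b)])) (k, out)).2 ++
      [PySem.List.slice s (some (bs.foldl (fun st b =>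
        (b, st.2 ++ [PySem.List.slice s (some st.1) (some b)])) (k, out)).1) none]) = out ++ pvWalk s k bs := by
  intro bs
  induction bs with
  | nil => intro k out; simp [pvWalk]
  | cons b bs ih =>
    intro k out
    simp only [List.foldl_cons, pvWalk]
    rw [ih]
    simp

lemma pvL (cf : Int) (s : List (List Int)) : ∀ (m j k : Nat) (hj : j < s.length), k ≤ j → s.length - (j + 1) = m →
    pvWalk s (k : Int) ((PySem.List.pyRange ((j : Int) + 1) (s.length : Int) 1).filter (pvCond cf s)) =
    pvSeg cf ((s.drop k).take (j + 1 - k)) s[j] (s.drop (j + 1)) := by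
  intro m
  induction m with
  | zero =>
    intro j k hj hk hm
    rw [PySem.List.pyRange_one_eq_nil (by exact_mod_cast Nat.le_of_sub_eq_zero hm)]
    simp only [List.filter_nil, pvWalk, PySem.List.slice_from_natCast]
    rw [show List.drop (j + 1) s = [] from List.drop_eq_nil_iff.mpr (by omega)]
    simp only [pvSeg]
    have : (s.drop k).take (j + 1 - k) = s.drop k := by
      apply List.take_of_length_le; rw [List.length_drop]; omega
    rw [this]
  | succ m ih =>
    intro j k hj hk hm
    have hlt : j + 1 < s.length := by omega
    have hcast : ((j : Int) + 1) = ((j + 1 : Nat) : Int) := by push_cast; ring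
    rw [PySem.List.pyRange_one_cons (by exact_mod_cast hlt)]
    have hpt1 : pvPt s (j : Int) = s[j] := by
      simp [pvPt, List.getElem?_eq_getElem hj]
    have hpt2 : pvPt s ((j : Int) + 1) = s[j + 1] := by
      unfold pvPt
      rw [PySem.List.pyGet?_of_nonneg s (by omega)]
      rw [show ((j : Int) + 1).toNat = j + 1 from by omega]
      rw [List.getElem?_eq_getElem hlt, Option.getD_some]
    have hdrop : s.drop (j + 1) = s[j + 1] :: s.drop (j + 2) := List.drop_eq_getElem_cons hlt
    by_cases hd : pvDist s[j] s[j + 1] > pvTh cf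
    · rw [List.filter_cons_of_pos (by simp [pvCond, hpt1, hpt2, hd])]
      simp only [pvWalk]
      rw [hcast]
      rw [ih (j + 1) (j + 1) hlt le_rfl (by omega)]
      have h1 : j + 1 + 1 - (j + 1) = 1 := by omega
      rw [h1, hdrop]
      simp only [List.take_add_one, List.take_zero, List.nil_append, List.getElem?_cons_zero,
        Option.toList_some]
      rw [← hdrop]
      rw [hdrop]
      simp only [pvSeg, if_pos hd]
      congr 1
      rw [PySem.List.slice_natCast]
    · rw [List.filter_cons_of_neg (by simp [pvCond, hpt1, hpt2, hd])]
      rw [hcast]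
      rw [ih (j + 1) k hlt (by omega) (by omega)]
      rw [hdrop]
      simp only [pvSeg, if_neg hd]
      congr 1
      have h2 : j + 1 + 1 - k = (j + 1 - k) + 1 := by omega
      rw [h2, List.take_add_one]
      congr 1
      rw [List.getElem?_drop]
      have h3 : k + (j + 1 - k) = j + 1 := by omega
      rw [h3]
      simp [hlt]

lemma pvStepA_eq (cf : Int) (stroke : List (List Int)) (acc : List (List (List Int))) :
    (match stroke with
     | [] => acc
     | p1 :: rest =>
       let r := rest.foldl (fun st p2 =>
         match st with
         | (p1, tstroke, acc) =>
           let d := (pvCoord p1 0 - pvCoord p2 0) ^ 2 + (pvCoord p1 1 - pvCoord p2 1) ^ 2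
           if d > 2 * (cf - 1) ^ 2 then (p2, [p2], acc ++ [tstroke])
           else (p2, tstroke ++ [p2], acc))
         (p1, [p1], acc)
       r.2.2 ++ [r.2.1]) = acc ++ pvF cf stroke := by
  cases stroke with
  | nil => simp [pvF]
  | cons p rest => exact pvA_inner cf rest p [p] acc

lemma pvStepB_eq (cf : Int) (stroke : List (List Int)) (out : List (List (List Int))) :
    (if stroke.isEmpty then out
     else
       let breaks := (PySem.List.pyRange 1 (stroke.length : Int) 1).filter (fun i =>
         decide ((pvCoord (pvPt stroke (i - 1)) 0 - pvCoord (pvPt stroke i) 0) ^ 2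
           + (pvCoord (pvPt stroke (i - 1)) 1 - pvCoord (pvPt stroke i) 1) ^ 2 > 2 * (cf - 1) ^ 2))
       let r := breaks.foldl (fun st b => (b, st.2 ++ [PySem.List.slice stroke (some st.1) (some b)]))
         ((0 : Int), out)
       r.2 ++ [PySem.List.slice stroke (some r.1) none]) = out ++ pvF cf stroke := by
  cases stroke with
  | nil => simp [pvF]
  | cons p rs =>
    show ((((PySem.List.pyRange 1 ((p :: rs).length : Int) 1).filter _).foldl _ ((0 : Int), out)).2 ++ _) = _
    have hpred : (fun i => decide ((pvCoord (pvPt (p :: rs) (i - 1)) 0 - pvCoord (pvPt (p :: rs) i) 0) ^ 2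
        + (pvCoord (pvPt (p :: rs) (i - 1)) 1 - pvCoord (pvPt (p :: rs) i) 1) ^ 2 > 2 * (cf - 1) ^ 2))
        = pvCond cf (p :: rs) := by
      funext i; simp [pvCond, pvDist, pvTh]
    rw [hpred, pvB_fold]
    have hL := pvL cf (p :: rs) ((p :: rs).length - 1) 0 0 (by simp) (le_refl 0) (by omega)
    simp only [Nat.cast_zero, zero_add, List.drop_zero, List.drop_one] at hL
    rw [hL]
    simp [pvF]

-- ===== VERDICT (by name: the statement is the Claim_ definition above) =====
theorem dumb_filter_spec : Claim_equal_dumb_filter := by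
  intro stroke_coords comp_factor _hdom _hpre
  unfold Spec_dumb_filter dumb_filter dumb_filter_alt
  refine Eq.trans
    (PySem.List.foldl_congr_mem stroke_coords _ (fun acc stroke => acc ++ pvF comp_factor stroke) []
      (fun acc x _ => pvStepA_eq comp_factor x acc))
    (PySem.List.foldl_congr_mem stroke_coords _ (fun acc stroke => acc ++ pvF comp_factor stroke) []
      (fun acc x _ => pvStepB_eq comp_factor x acc)).symm
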